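-- pv_equiv track=rewrite | github.com/taeyeon5362/codingTestPractice | 프로그래머스/unrated/181880. 1로 만들기/1로 만들기.py | solution
-- ===== SOURCE A (Python) =====
-- def solution(num_list):
--     answer = 0
--     for j in num_list :
--         while(1) :
--             if j > 1 :
--                 answer += 1
--                 j = j // 2
--             else :
--                 break
--     return answer
-- ===== SOURCE B (Python) =====
-- def solution(num_list):
--     return sum(j.bit_length() - 1 for j in num_list if j > 1)
-- ===== Notes on version B (the rewrite author's own statement) =====
-- stated objective: faster
-- what changed: Replaced the per-element halving while-loop with the closed form bit_length(j)-1 summed in a single generator expression.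
import Mathlib
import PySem

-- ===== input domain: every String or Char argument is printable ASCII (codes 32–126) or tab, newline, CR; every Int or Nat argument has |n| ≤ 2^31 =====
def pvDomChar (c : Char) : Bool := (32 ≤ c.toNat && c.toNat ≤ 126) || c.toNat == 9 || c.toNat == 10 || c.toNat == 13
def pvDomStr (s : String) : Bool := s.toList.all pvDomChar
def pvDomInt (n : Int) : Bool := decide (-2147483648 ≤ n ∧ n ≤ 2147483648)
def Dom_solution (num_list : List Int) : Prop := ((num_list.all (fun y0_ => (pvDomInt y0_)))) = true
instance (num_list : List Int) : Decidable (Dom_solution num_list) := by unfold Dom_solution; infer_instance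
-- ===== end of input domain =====

-- B replaces the inner halving loop by the closed form bit_length(j)-1; objective: faster (constant factor).

-- ===== PORT A =====
-- the inner 'while' loop of A: repeatedly halve j, incrementing answer, until j ≤ 1
def solutionWhile (answer j : Int) : Int :=
  if h : j > 1 then solutionWhile (answer + 1) (PySem.Int.floordiv j 2) else answer
termination_by j.toNat
decreasing_by
  rw [PySem.Int.floordiv_eq_ediv_of_pos (by omega)]
  omega

def solution (num_list : List Int) : Int :=
  num_list.foldl (fun answer j => solutionWhile answer j) 0

-- ===== PORT B =====
def solution_alt (num_list : List Int) : Int :=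
  num_list.foldl (fun acc j => if j > 1 then acc + ((PySem.Int.bitLength j : Int) - 1) else acc) 0

-- ===== PRECONDITION & SPEC =====
def Spec_solution (num_list : List Int) (out : Int) : Prop := out = solution_alt num_list
instance (num_list : List Int) (out : Int) : Decidable (Spec_solution num_list out) := by unfold Spec_solution; infer_instance

-- ===== CLAIM (what is proved, stated in full; the proofs are below) =====
def Claim_equal_solution : Prop := ∀ (num_list : List Int), Dom_solution num_list → Spec_solution num_list (solution num_list)

-- ===== LEMMAS AND PROOFS =====
theorem solutionWhile_eq (answer j : Int) :
    solutionWhile answer j = answer + (if j > 1 then (PySem.Int.bitLength j : Int) - 1 else 0) := by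
  induction answer, j using solutionWhile.induct with
  | case1 answer j h ih =>
    rw [solutionWhile, dif_pos h, ih, if_pos h]
    have hf : PySem.Int.floordiv j 2 = j / 2 :=
      PySem.Int.floordiv_eq_ediv_of_pos (by omega)
    have hb : PySem.Int.bitLength j = PySem.Int.bitLength (PySem.Int.floordiv j 2) + 1 :=
      PySem.Int.bitLength_of_pos (by omega)
    by_cases h2 : PySem.Int.floordiv j 2 > 1
    · rw [if_pos h2, hb]; push_cast; ring
    · rw [if_neg h2]
      have h1 : PySem.Int.floordiv j 2 = 1 := by rw [hf] at h2 ⊢; omega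
      rw [h1] at hb
      have hone : PySem.Int.bitLength (1 : Int) = 1 := by decide
      rw [hone] at hb
      rw [hb]; push_cast; ring
  | case2 answer j h =>
    rw [solutionWhile, dif_neg h, if_neg h, add_zero]

theorem foldl_eq (num_list : List Int) : ∀ a : Int,
    num_list.foldl (fun answer j => solutionWhile answer j) a
      = num_list.foldl (fun acc j => if j > 1 then acc + ((PySem.Int.bitLength j : Int) - 1) else acc) a := by
  induction num_list with
  | nil => intro a; rfl
  | cons x xs ih =>
    intro a
    rw [List.foldl_cons, List.foldl_cons, ih, solutionWhile_eq]
    by_cases h : x > 1 <;> simp [h]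

-- ===== VERDICT (by name: the statement is the Claim_ definition above) =====
theorem solution_spec : Claim_equal_solution := by
  intro num_list _
  unfold Spec_solution solution solution_alt
  exact foldl_eq num_list 0
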